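-- pv_equiv track=rewrite | github.com/randall-frank/spaceparanoia | utilities/scrape.py | generate_hgr_offsets
-- ===== SOURCE A (Python) =====
-- def generate_hgr_offsets(base_addr=0x2000):
--     offsets = []
--     for y in range(192):
--         addr = (y % 8)*1024
--         addr += ((y // 8) % 8) * 128
--         addr += ((y//64)*40)
--         addr += (y % 8)//8
--         offsets.append(addr+base_addr)
--     return offsets
-- ===== SOURCE B (Python) =====
-- def generate_hgr_offsets(base_addr=0x2000):
--     # Enumerate the HGR layout components directly: y = 64*a + 8*b + c
--     # (a = screen third, b = row within third, c = scanline within row),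
--     # so the flat y-loop's modular arithmetic disappears.
--     offsets = []
--     for a in range(3):
--         for b in range(8):
--             for c in range(8):
--                 offsets.append(c * 1024 + b * 128 + a * 40 + base_addr)
--     return offsets
-- ===== Notes on version B (the rewrite author's own statement) =====
-- stated objective: simpler
-- what changed: B enumerates the HGR layout components directly with three nested loops over (screen third, row within third, scanline within row) and composes each address from those components, instead of a flat loop over every line number that inverts the decomposition with modulus and floor-division operations plus an always-zero correction term.
import Mathlib
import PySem

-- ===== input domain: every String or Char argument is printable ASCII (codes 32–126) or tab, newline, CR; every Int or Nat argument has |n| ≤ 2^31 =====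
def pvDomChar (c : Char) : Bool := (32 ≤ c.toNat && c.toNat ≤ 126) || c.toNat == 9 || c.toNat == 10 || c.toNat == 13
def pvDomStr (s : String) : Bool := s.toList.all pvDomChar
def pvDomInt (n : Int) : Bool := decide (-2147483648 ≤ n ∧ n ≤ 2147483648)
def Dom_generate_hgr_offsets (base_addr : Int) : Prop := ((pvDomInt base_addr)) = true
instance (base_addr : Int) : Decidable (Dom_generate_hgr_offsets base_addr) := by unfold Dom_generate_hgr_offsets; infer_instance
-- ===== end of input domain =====

-- ===== PORT A =====
-- Header: B enumerates the layout components (third, row, scanline) with three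
-- nested loops instead of inverting them from a flat y-loop with divisions;
-- objective: simpler.
def generate_hgr_offsets (base_addr : Int) : List Int :=
  (PySem.List.pyRange 0 192 1).foldl (fun offsets y =>
    offsets ++ [(((PySem.Int.mod y 8) * 1024
        + (PySem.Int.mod (PySem.Int.floordiv y 8) 8) * 128
        + (PySem.Int.floordiv y 64) * 40
        + PySem.Int.floordiv (PySem.Int.mod y 8) 8) + base_addr)]) []

-- ===== PORT B =====
def generate_hgr_offsets_alt (base_addr : Int) : List Int :=
  (PySem.List.pyRange 0 3 1).foldl (fun acc a =>
    (PySem.List.pyRange 0 8 1).foldl (fun acc b =>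
      (PySem.List.pyRange 0 8 1).foldl (fun acc c =>
        acc ++ [c * 1024 + b * 128 + a * 40 + base_addr]) acc) acc) []

-- ===== PRECONDITION & SPEC =====
def Spec_generate_hgr_offsets (base_addr : Int) (out : List Int) : Prop := out = generate_hgr_offsets_alt base_addr
instance (base_addr : Int) (out : List Int) : Decidable (Spec_generate_hgr_offsets base_addr out) := by unfold Spec_generate_hgr_offsets; infer_instance

-- ===== CLAIM (what is proved, stated in full; the proofs are below) =====
def Claim_equal_generate_hgr_offsets : Prop := ∀ (base_addr : Int), Dom_generate_hgr_offsets base_addr → Spec_generate_hgr_offsets base_addr (generate_hgr_offsets base_addr)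

-- ===== LEMMAS AND PROOFS =====

-- The per-scanline address A computes from y (proof-side name for A's loop body arithmetic).
def pvGA (y : Int) : Int :=
  (PySem.Int.mod y 8) * 1024 + (PySem.Int.mod (PySem.Int.floordiv y 8) 8) * 128
    + (PySem.Int.floordiv y 64) * 40 + PySem.Int.floordiv (PySem.Int.mod y 8) 8

-- The address B computes from the layout components (third a, row b, scanline c).
def pvHB (a b c : Int) : Int := c * 1024 + b * 128 + a * 40

-- The two base-0 address tables coincide (closed computation over 192 entries).
set_option maxRecDepth 4000 in
theorem pv_tables_eq :
    (PySem.List.pyRange 0 192 1).map pvGA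
      = (PySem.List.pyRange 0 3 1).flatMap (fun a =>
          (PySem.List.pyRange 0 8 1).flatMap (fun b =>
            (PySem.List.pyRange 0 8 1).map (fun c => pvHB a b c))) := by decide

theorem pv_ports_agree (base : Int) :
    generate_hgr_offsets base = generate_hgr_offsets_alt base := by
  unfold generate_hgr_offsets generate_hgr_offsets_alt
  simp only [PySem.List.foldl_append_singleton_eq_map, PySem.List.foldl_append_eq_flatMap,
    List.nil_append]
  calc ((PySem.List.pyRange 0 192 1).map (fun y => pvGA y + base))
      = ((PySem.List.pyRange 0 192 1).map pvGA).map (fun v => v + base) := by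
        simp [List.map_map]
    _ = ((PySem.List.pyRange 0 3 1).flatMap (fun a =>
          (PySem.List.pyRange 0 8 1).flatMap (fun b =>
            (PySem.List.pyRange 0 8 1).map (fun c => pvHB a b c)))).map (fun v => v + base) := by
        rw [pv_tables_eq]
    _ = (PySem.List.pyRange 0 3 1).flatMap (fun a =>
          (PySem.List.pyRange 0 8 1).flatMap (fun b =>
            (PySem.List.pyRange 0 8 1).map (fun c => pvHB a b c + base))) := by
        simp only [List.map_flatMap]
        rfl

-- ===== VERDICT (by name: the statement is the Claim_ definition above) =====
theorem generate_hgr_offsets_spec : Claim_equal_generate_hgr_offsets := by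
  intro base _
  exact pv_ports_agree base
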